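-- pv_equiv track=rewrite | github.com/samy22223/ultra-pinnacle-studio | ultra_pinnacle_studio/api_gateway/auto_healing_ai_engineer/factory.py | _optimize_layer_config
-- ===== SOURCE A (Python) =====
-- from typing import Dict, List, Any, Optional, Type, Callable, Tuple
--
-- def _optimize_layer_config(current_layers: List[str], target_count: int, requirements: Dict[str, Any]) -> List[str]:
--     """Optimize layer configuration based on requirements"""
--     if len(current_layers) == target_count:
--         return current_layers
--
--     # Add or remove layers to reach target
--     optimized_layers = current_layers.copy()
--
--     while len(optimized_layers) < target_count:
--         # Add intermediate layers
--         if "attention" in optimized_layers: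
--             insert_idx = optimized_layers.index("attention")
--             optimized_layers.insert(insert_idx, "residual_block")
--         else:
--             optimized_layers.append("dense_layer")
--
--     while len(optimized_layers) > target_count:
--         # Remove less critical layers
--         if "dense_layer" in optimized_layers:
--             optimized_layers.remove("dense_layer")
--         else:
--             break  # Don't remove essential layers
--
--     return optimized_layers
-- ===== SOURCE B (Python) =====
-- def _optimize_layer_config(current_layers, target_count, requirements):
--     """Reach target layer count with one batch insert/append or one filtering pass."""
--     need = target_count - len(current_layers)
--     if need > 0:
--         if "attention" in current_layers:
--             i = current_layers.index("attention")
--             return current_layers[:i] + ["residual_block"] * need + current_layers[i:]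
--         return current_layers + ["dense_layer"] * need
--     if need < 0:
--         k = min(-need, current_layers.count("dense_layer"))
--         out = []
--         for x in current_layers:
--             if k > 0 and x == "dense_layer":
--                 k -= 1
--             else:
--                 out.append(x)
--         return out
--     return current_layers
-- ===== Notes on version B (the rewrite author's own statement) =====
-- stated objective: alternative
-- what changed: Replaces A's one-element-per-iteration while loops (repeated index/insert and repeated remove) with a single batch insert of all residual_blocks at the attention index (or one batch append of dense_layers) and a single filtering pass that drops the first k dense_layers.
import Mathlib
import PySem

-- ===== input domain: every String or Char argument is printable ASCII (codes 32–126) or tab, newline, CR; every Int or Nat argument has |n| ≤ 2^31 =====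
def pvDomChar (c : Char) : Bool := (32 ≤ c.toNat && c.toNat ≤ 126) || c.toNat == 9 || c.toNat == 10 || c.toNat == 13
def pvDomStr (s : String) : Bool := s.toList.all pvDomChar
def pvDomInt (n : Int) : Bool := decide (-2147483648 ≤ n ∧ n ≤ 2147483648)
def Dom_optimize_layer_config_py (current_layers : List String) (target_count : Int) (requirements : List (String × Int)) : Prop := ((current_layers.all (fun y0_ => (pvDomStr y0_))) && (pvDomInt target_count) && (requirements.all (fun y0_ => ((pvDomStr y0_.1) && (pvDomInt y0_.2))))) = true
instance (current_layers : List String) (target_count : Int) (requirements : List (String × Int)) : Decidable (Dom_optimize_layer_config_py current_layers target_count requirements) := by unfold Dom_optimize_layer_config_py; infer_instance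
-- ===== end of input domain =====

-- B replaces A's element-at-a-time insert/remove while loops by one batch insert (or append)
-- and one filtering pass; objective: alternative (a different algorithm of similar measured cost).

-- ===== PORT A =====
-- first while loop of A: insert "residual_block"/append "dense_layer" until target is reached
def pvGrowA (layers : List String) (target : Int) : List String :=
  if h : (layers.length : Int) < target then
    if "attention" ∈ layers then
      pvGrowA (PySem.List.insert layers (((PySem.List.index? layers "attention").getD 0 : Nat) : Int) "residual_block") target
    else
      pvGrowA (layers ++ ["dense_layer"]) target
  else layers
termination_by (target - (layers.length : Int)).toNat
decreasing_by
  · simp [PySem.List.length_insert]; omega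
  · simp; omega

-- second while loop of A: remove first "dense_layer" until target is reached (or break)
def pvShrinkA (layers : List String) (target : Int) : List String :=
  if h : target < (layers.length : Int) then
    if hm : "dense_layer" ∈ layers then
      pvShrinkA (layers.erase "dense_layer") target
    else layers
  else layers
termination_by layers.length
decreasing_by
  have h1 := List.length_erase_of_mem hm
  have h2 := List.length_pos_of_mem hm
  omega

def optimize_layer_config_py (current_layers : List String) (target_count : Int) (requirements : List (String × Int)) : List String :=
  if (current_layers.length : Int) = target_count then current_layers
  else pvShrinkA (pvGrowA current_layers target_count) target_count

-- ===== PORT B =====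
-- B's filtering pass: drop the first k occurrences of "dense_layer"
def pvDropDense (k : Nat) (xs : List String) : List String :=
  match xs with
  | [] => []
  | x :: rest =>
    if k > 0 ∧ x = "dense_layer" then pvDropDense (k - 1) rest
    else x :: pvDropDense k rest

def optimize_layer_config_py_alt (current_layers : List String) (target_count : Int) (requirements : List (String × Int)) : List String :=
  if target_count - (current_layers.length : Int) > 0 then
    if "attention" ∈ current_layers then
      current_layers.take ((PySem.List.index? current_layers "attention").getD 0)
        ++ List.replicate (target_count - (current_layers.length : Int)).toNat "residual_block"
        ++ current_layers.drop ((PySem.List.index? current_layers "attention").getD 0)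
    else current_layers ++ List.replicate (target_count - (current_layers.length : Int)).toNat "dense_layer"
  else if target_count - (current_layers.length : Int) < 0 then
    pvDropDense (min (-(target_count - (current_layers.length : Int))).toNat (current_layers.count "dense_layer")) current_layers
  else current_layers

-- ===== PRECONDITION & SPEC =====
def Spec_optimize_layer_config_py (current_layers : List String) (target_count : Int) (requirements : List (String × Int)) (out : List String) : Prop := out = optimize_layer_config_py_alt current_layers target_count requirements
instance (current_layers : List String) (target_count : Int) (requirements : List (String × Int)) (out : List String) : Decidable (Spec_optimize_layer_config_py current_layers target_count requirements out) := by unfold Spec_optimize_layer_config_py; infer_instance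

-- ===== CLAIM (what is proved, stated in full; the proofs are below) =====
def Claim_equal_optimize_layer_config_py : Prop := ∀ (current_layers : List String) (target_count : Int) (requirements : List (String × Int)), Dom_optimize_layer_config_py current_layers target_count requirements → Spec_optimize_layer_config_py current_layers target_count requirements (optimize_layer_config_py current_layers target_count requirements)

-- ===== LEMMAS AND PROOFS =====

lemma index?_sandwich (pre suf : List String) (v : String) (h : v ∉ pre) :
    PySem.List.index? (pre ++ v :: suf) v = some pre.length := by
  rw [PySem.List.index?_eq_some_iff]; exact ⟨pre, suf, rfl, rfl, h⟩

lemma pvGrowA_attention (n : Nat) : ∀ (pre suf : List String) (target : Int),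
    "attention" ∉ pre → (target - ((pre.length + 1 + suf.length : Nat) : Int)).toNat = n →
    pvGrowA (pre ++ "attention" :: suf) target =
      pre ++ List.replicate n "residual_block" ++ "attention" :: suf := by
  induction n with
  | zero =>
    intro pre suf target hpre hn
    have hlen : ¬ (((pre ++ "attention" :: suf).length : Int) < target) := by
      simp only [List.length_append, List.length_cons]; push_cast; omega
    rw [pvGrowA, dif_neg hlen]
    simp
  | succ n ih =>
    intro pre suf target hpre hn
    have hlen : (((pre ++ "attention" :: suf).length : Int) < target) := by
      simp only [List.length_append, List.length_cons]; push_cast; omega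
    have hmem : "attention" ∈ pre ++ "attention" :: suf := by simp
    have hidx : ((PySem.List.index? (pre ++ "attention" :: suf) "attention").getD 0) = pre.length := by
      rw [index?_sandwich pre suf _ hpre]; rfl
    have hins : PySem.List.insert (pre ++ "attention" :: suf)
          (((PySem.List.index? (pre ++ "attention" :: suf) "attention").getD 0 : Nat) : Int) "residual_block"
        = (pre ++ ["residual_block"]) ++ "attention" :: suf := by
      rw [hidx, PySem.List.insert_natCast _ _ _ (by simp)]
      simp
    have hpre' : "attention" ∉ pre ++ ["residual_block"] := by
      simp only [List.mem_append, List.mem_singleton]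
      rintro (hc | hc)
      · exact hpre hc
      · exact absurd hc (by decide)
    have ih' := ih (pre ++ ["residual_block"]) suf target hpre' (by simp; omega)
    rw [pvGrowA, dif_pos hlen, if_pos hmem, hins, ih']
    simp [List.replicate_succ]

lemma pvGrowA_no_attention (n : Nat) : ∀ (xs : List String) (target : Int),
    "attention" ∉ xs → (target - (xs.length : Int)).toNat = n →
    pvGrowA xs target = xs ++ List.replicate n "dense_layer" := by
  induction n with
  | zero =>
    intro xs target hx hn
    have hlen : ¬ ((xs.length : Int) < target) := by omega
    rw [pvGrowA, dif_neg hlen]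
    simp
  | succ n ih =>
    intro xs target hx hn
    have hlen : ((xs.length : Int) < target) := by omega
    have hx' : "attention" ∉ xs ++ ["dense_layer"] := by
      simp only [List.mem_append, List.mem_singleton]
      rintro (hc | hc)
      · exact hx hc
      · exact absurd hc (by decide)
    have ih' := ih (xs ++ ["dense_layer"]) target hx' (by simp; omega)
    rw [pvGrowA, dif_pos hlen, if_neg hx, ih']
    simp [List.replicate_succ]

lemma pvDropDense_zero (xs : List String) : pvDropDense 0 xs = xs := by
  induction xs with
  | nil => rfl
  | cons x rest ih => simp [pvDropDense, ih]

lemma pvDropDense_succ (k : Nat) (xs : List String) (h : "dense_layer" ∈ xs) :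
    pvDropDense (k + 1) xs = pvDropDense k (xs.erase "dense_layer") := by
  induction xs with
  | nil => simp at h
  | cons x rest ih =>
    by_cases hx : x = "dense_layer"
    · subst hx; simp [pvDropDense, List.erase_cons_head]
    · have hr : "dense_layer" ∈ rest := by
        rcases List.mem_cons.mp h with h | h
        · exact absurd h.symm hx
        · exact h
      rw [List.erase_cons_tail (by simpa using hx)]
      simp [pvDropDense, hx, ih hr]

lemma pvShrinkA_eq (m : Nat) : ∀ (xs : List String) (target : Int), xs.length = m →
    pvShrinkA xs target = pvDropDense (min ((xs.length : Int) - target).toNat (xs.count "dense_layer")) xs := by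
  induction m using Nat.strong_induction_on with
  | _ m ih =>
    intro xs target hm
    by_cases hlen : target < (xs.length : Int)
    · by_cases hmem : "dense_layer" ∈ xs
      · have hle : (xs.erase "dense_layer").length = xs.length - 1 := List.length_erase_of_mem hmem
        have hlpos : 1 ≤ xs.length := List.length_pos_of_mem hmem
        have hlt : (xs.erase "dense_layer").length < m := by omega
        have ihr := ih _ hlt (xs.erase "dense_layer") target rfl
        rw [pvShrinkA, dif_pos hlen, dif_pos hmem, ihr]
        have hcnt : (xs.erase "dense_layer").count "dense_layer" = xs.count "dense_layer" - 1 :=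
          List.count_erase_self ..
        have hcpos : 1 ≤ xs.count "dense_layer" := List.one_le_count_iff.mpr hmem
        have harith : min (((xs.length : Int)) - target).toNat (xs.count "dense_layer")
            = min (((xs.erase "dense_layer").length : Int) - target).toNat
                ((xs.erase "dense_layer").count "dense_layer") + 1 := by
          rw [hle, hcnt]; omega
        rw [harith, pvDropDense_succ _ _ hmem]
      · have hz : xs.count "dense_layer" = 0 := List.count_eq_zero.mpr hmem
        rw [pvShrinkA, dif_pos hlen, dif_neg hmem, hz]
        simp [pvDropDense_zero]
    · have hz : ((xs.length : Int) - target).toNat = 0 := by omega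
      rw [pvShrinkA, dif_neg hlen, hz]
      simp [pvDropDense_zero]

lemma pvShrinkA_of_le (xs : List String) (target : Int) (h : (xs.length : Int) ≤ target) :
    pvShrinkA xs target = xs := by
  rw [pvShrinkA, dif_neg (by omega)]

lemma mem_decomp (xs : List String) (h : "attention" ∈ xs) :
    ∃ pre suf, xs = pre ++ "attention" :: suf ∧ "attention" ∉ pre ∧
      (PySem.List.index? xs "attention").getD 0 = pre.length := by
  obtain ⟨k, hk⟩ := Option.isSome_iff_exists.mp ((PySem.List.index?_isSome_iff xs _).2 h)
  obtain ⟨pre, suf, hdec, hlen, hnot⟩ := (PySem.List.index?_eq_some_iff ..).mp hk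
  exact ⟨pre, suf, hdec, hnot, by rw [hk]; simp [hlen]⟩

-- ===== VERDICT (by name: the statement is the Claim_ definition above) =====
theorem optimize_layer_config_py_spec : Claim_equal_optimize_layer_config_py := by
  intro cls target reqs _
  unfold Spec_optimize_layer_config_py optimize_layer_config_py optimize_layer_config_py_alt
  by_cases heq : (cls.length : Int) = target
  · simp [heq]
  · rw [if_neg heq]
    by_cases hlt : (cls.length : Int) < target
    · -- growth case: the shrink loop is a no-op afterwards
      have hneed : target - (cls.length : Int) > 0 := by omega
      by_cases hmem : "attention" ∈ cls
      · obtain ⟨pre, suf, hdec, hnot, hidx⟩ := mem_decomp cls hmem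
        have hcl : cls.length = pre.length + 1 + suf.length := by rw [hdec]; simp; omega
        have hg : pvGrowA cls target
            = pre ++ List.replicate (target - (cls.length : Int)).toNat "residual_block" ++ "attention" :: suf := by
          conv_lhs => rw [hdec]
          exact pvGrowA_attention _ pre suf target hnot (by rw [hcl])
        rw [pvShrinkA_of_le _ _ (by rw [hg]; simp; omega), hg,
            if_pos hneed, if_pos hmem, hidx]
        have htake : cls.take pre.length = pre := by rw [hdec]; simp
        have hdrop : cls.drop pre.length = "attention" :: suf := by
          rw [hdec, List.drop_append_of_le_length (le_refl _)]
          simp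
        rw [htake, hdrop]
      · have hg : pvGrowA cls target = cls ++ List.replicate (target - (cls.length : Int)).toNat "dense_layer" :=
          pvGrowA_no_attention _ cls target hmem rfl
        rw [pvShrinkA_of_le _ _ (by rw [hg]; simp; omega), hg, if_pos hneed, if_neg hmem]
    · -- shrink case: the grow loop is a no-op
      have hgt : target < (cls.length : Int) := by omega
      have hg : pvGrowA cls target = cls := by rw [pvGrowA, dif_neg (by omega)]
      rw [hg, pvShrinkA_eq cls.length _ _ rfl,
          if_neg (by omega), if_pos (by omega : target - (cls.length : Int) < 0)]
      congr 1
      omega
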